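-- pv_equiv track=rewrite | github.com/e-tony/Dissecting_Implicit_Bias_in_Language_Models | src/analysis/generate_mlm_heatmap.py | sort_adjectives
-- ===== SOURCE A (Python) =====
-- def sort_adjectives(words, weights):
--     sorted_words = sorted(words)
--
--     new_weights = []
--
--     for word in sorted_words:
--         for i, w in enumerate(words):
--             if w == word:
--                 new_weights.append(weights[i])
--
--     return sorted_words, new_weights
-- ===== SOURCE B (Python) =====
-- def sort_adjectives(words, weights):
--     groups = {}
--     for i, w in enumerate(words):
--         groups.setdefault(w, []).append(weights[i])
--     sorted_words = sorted(words)
--     new_weights = []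
--     for w in sorted_words:
--         new_weights += groups[w]
--     return sorted_words, new_weights
-- ===== Notes on version B (the rewrite author's own statement) =====
-- stated objective: faster
-- what changed: Replaces A's inner scan of all words for every sorted word by a dict word->weights built in one pass, then one extend per sorted word; intended as faster (measured 2.71x at the largest size both finished, n=4096).
import Mathlib
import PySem

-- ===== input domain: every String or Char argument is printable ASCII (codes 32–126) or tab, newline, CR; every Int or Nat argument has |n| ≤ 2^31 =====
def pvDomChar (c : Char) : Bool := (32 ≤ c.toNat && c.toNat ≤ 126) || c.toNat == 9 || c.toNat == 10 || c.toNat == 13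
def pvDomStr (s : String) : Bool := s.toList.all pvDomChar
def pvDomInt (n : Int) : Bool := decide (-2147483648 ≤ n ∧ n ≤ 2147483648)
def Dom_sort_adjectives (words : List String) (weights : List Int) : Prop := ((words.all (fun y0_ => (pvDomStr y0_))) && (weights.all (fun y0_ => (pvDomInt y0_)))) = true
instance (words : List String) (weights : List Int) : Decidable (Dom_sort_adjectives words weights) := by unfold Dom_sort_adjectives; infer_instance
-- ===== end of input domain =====

-- B replaces A's inner scan of all words per sorted word by a dict word->weights built once; intended as faster (measured 2.71x at n=4096); return value proved equal on Pre_.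

-- ===== PORT A =====
def sort_adjectives (words : List String) (weights : List Int) : List String × List Int :=
  let sorted_words := PySem.List.sorted words (fun x => x)
  let new_weights := sorted_words.foldl (fun acc word =>
    (PySem.List.enumerate words).foldl
      (fun acc2 p => if p.2 == word then acc2 ++ [PySem.List.pyGetD weights p.1 0] else acc2) acc) []
  (sorted_words, new_weights)

-- ===== PORT B =====
def sort_adjectives_alt (words : List String) (weights : List Int) : List String × List Int :=
  let groups : PySem.Dict String (List Int) := (PySem.List.enumerate words).foldl
    (fun d p => d.modify p.2 [] (· ++ [PySem.List.pyGetD weights p.1 0])) PySem.Dict.empty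
  let sorted_words := PySem.List.sorted words (fun x => x)
  let new_weights := sorted_words.foldl (fun acc w => acc ++ groups.getD w []) []
  (sorted_words, new_weights)

-- ===== PRECONDITION & SPEC =====
-- A evaluates weights[i] for every index i of words, so it raises IndexError when weights is shorter than words.
def Pre_sort_adjectives (words : List String) (weights : List Int) : Prop := words.length ≤ weights.length
instance (words : List String) (weights : List Int) : Decidable (Pre_sort_adjectives words weights) := by unfold Pre_sort_adjectives; infer_instance
def pvWitness_sort_adjectives : List String × List Int := (["b", "a", "b"], [1, 2, 3])
def Spec_sort_adjectives (words : List String) (weights : List Int) (out : List String × List Int) : Prop := out = sort_adjectives_alt words weights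
instance (words : List String) (weights : List Int) (out : List String × List Int) : Decidable (Spec_sort_adjectives words weights out) := by unfold Spec_sort_adjectives; infer_instance

-- ===== CLAIM (what is proved, stated in full; the proofs are below) =====
def Claim_equal_sort_adjectives : Prop := ∀ (words : List String) (weights : List Int), Dom_sort_adjectives words weights → Pre_sort_adjectives words weights → Spec_sort_adjectives words weights (sort_adjectives words weights)

-- ===== LEMMAS AND PROOFS =====

-- B's dict lookup equals A's filtered scan over enumerate(words), for every word.
theorem groups_getD (words : List String) (weights : List Int) (word : String) :
    ((PySem.List.enumerate words).foldl
      (fun d p => d.modify p.2 [] (· ++ [PySem.List.pyGetD weights p.1 0])) PySem.Dict.empty).getD word []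
    = ((PySem.List.enumerate words).filter (fun p => p.2 == word)).map
        (fun p => PySem.List.pyGetD weights p.1 0) := by
  rw [show (fun (d : PySem.Dict String (List Int)) (p : Int × String) =>
        d.modify p.2 [] (· ++ [PySem.List.pyGetD weights p.1 0]))
      = (fun d p => (fun (d : PySem.Dict String (List Int)) (q : String × Int) =>
          d.modify q.1 [] (· ++ [q.2])) d
          ((fun p => (p.2, PySem.List.pyGetD weights p.1 0)) p)) from rfl,
    ← List.foldl_map (f := fun p : Int × String => (p.2, PySem.List.pyGetD weights p.1 0))
      (g := fun (d : PySem.Dict String (List Int)) (q : String × Int) => d.modify q.1 [] (· ++ [q.2]))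
      (l := PySem.List.enumerate words) (init := PySem.Dict.empty),
    PySem.Dict.getD_foldl_modify_append]
  simp [List.filter_map, Function.comp_def]

-- ===== VERDICT (by name: the statement is the Claim_ definition above) =====
theorem sort_adjectives_spec : Claim_equal_sort_adjectives := by
  intro words weights _ _
  unfold Spec_sort_adjectives sort_adjectives sort_adjectives_alt
  refine Prod.ext rfl ?_
  apply PySem.List.foldl_congr_mem
  intro acc w _
  rw [PySem.List.foldl_append_if, groups_getD]
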